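-- pv_equiv track=rewrite | github.com/Dressingoak/adventofcode | 2021/dec3/solution.py | compute
-- ===== SOURCE A (Python) =====
-- def compute(data: list[list[int]]):
--     rows = len(data)
--     cols = len(data[0])
--     gamma = 0
--     epsilon = 0
--     for j in range(cols):
--         ones = sum(data[i][j] for i in range(rows))
--         value = 2**(cols - j - 1)
--         if ones > rows / 2:
--             gamma += value
--         else:
--             epsilon += value
--     return gamma * epsilon
-- ===== SOURCE B (Python) =====
-- def compute(data: list[list[int]]):
--     rows = len(data)
--     gbits = "".join("1" if 2 * sum(col) > rows else "0" for col in zip(*data))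
--     ebits = "".join("0" if b == "1" else "1" for b in gbits)
--     gamma = int(gbits, 2) if gbits else 0
--     epsilon = int(ebits, 2) if ebits else 0
--     return gamma * epsilon
-- ===== Notes on version B (the rewrite author's own statement) =====
-- stated objective: alternative
-- what changed: B transposes the grid with zip(*data), renders each column's majority decision as a character of a binary string, derives epsilon's string by flipping the characters, and parses both strings with int(s, 2), instead of A's index-based double loop accumulating gamma and epsilon additively with explicit powers of two; zip/sum iterate rows in C instead of per-element data[i][j] indexing.
import Mathlib
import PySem

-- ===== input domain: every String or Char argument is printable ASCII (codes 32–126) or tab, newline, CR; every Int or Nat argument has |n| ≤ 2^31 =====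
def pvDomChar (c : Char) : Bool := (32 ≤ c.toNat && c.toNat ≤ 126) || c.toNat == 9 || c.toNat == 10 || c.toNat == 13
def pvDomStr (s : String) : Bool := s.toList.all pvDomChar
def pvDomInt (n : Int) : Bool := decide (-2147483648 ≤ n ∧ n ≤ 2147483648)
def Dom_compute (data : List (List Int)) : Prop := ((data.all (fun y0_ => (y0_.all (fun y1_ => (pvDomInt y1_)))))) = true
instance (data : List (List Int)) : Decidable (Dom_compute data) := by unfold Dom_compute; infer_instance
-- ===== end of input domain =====

-- B transposes the grid (zip(*data)), renders each column's majority as a character of a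
-- binary string, flips it for epsilon, and parses both strings with int(s, 2) — an
-- alternative decomposition of the same cost. Equivalence is about the return value only.

-- ===== PORT A =====
-- 'ones > rows / 2' (exact float comparison of ints) is transliterated as the
-- exactly equivalent integer comparison '2 * ones > rows'.
def compute (data : List (List Int)) : Int :=
  let rows := data.length
  let cols := (data.getD 0 []).length
  let p : Int × Int := (List.range cols).foldl
    (fun (p : Int × Int) j =>
      let ones : Int := ((List.range rows).map (fun i => (data.getD i []).getD j 0)).sum
      let value : Int := 2 ^ (cols - j - 1)
      if 2 * ones > (rows : Int) then (p.1 + value, p.2) else (p.1, p.2 + value))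
    (0, 0)
  p.1 * p.2

-- ===== PORT B =====
-- zip(*data): columns up to the shortest row; fuel = first row's length bounds the output
-- (zip of no iterables is empty).
def ptAux : Nat → List (List Int) → List (List Int)
  | 0, _ => []
  | n + 1, rows =>
    if rows.any List.isEmpty then []
    else (rows.map (fun r => r.headD 0)) :: ptAux n (rows.map List.tail)

def pyTranspose : List (List Int) → List (List Int)
  | [] => []
  | r :: rs => ptAux r.length (r :: rs)

-- int(s, 2): exact on strings of '0'/'1' characters, which is all B ever parses.
def parseBin (cs : List Char) : Int :=
  cs.foldl (fun a c => 2 * a + (if c = '1' then 1 else 0)) 0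

def compute_alt (data : List (List Int)) : Int :=
  let rows := data.length
  let gbits : List Char :=
    (pyTranspose data).map (fun col => if 2 * col.sum > (rows : Int) then '1' else '0')
  let ebits : List Char := gbits.map (fun b => if b = '1' then '0' else '1')
  let gamma := if gbits ≠ [] then parseBin gbits else 0
  let epsilon := if ebits ≠ [] then parseBin ebits else 0
  gamma * epsilon

-- ===== PRECONDITION & SPEC =====
-- Pre_ excludes exactly the inputs where Python A raises IndexError: the empty
-- grid (data[0]) and ragged grids with some row shorter than the first row.
def Pre_compute (data : List (List Int)) : Prop :=
  data ≠ [] ∧ ∀ row ∈ data, (data.getD 0 []).length ≤ row.length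
instance (data : List (List Int)) : Decidable (Pre_compute data) := by unfold Pre_compute; infer_instance
def pvWitness_compute : List (List Int) := [[1, 0], [0, 1], [1, 1]]

def Spec_compute (data : List (List Int)) (out : Int) : Prop := out = compute_alt data
instance (data : List (List Int)) (out : Int) : Decidable (Spec_compute data out) := by unfold Spec_compute; infer_instance

-- ===== CLAIM (what is proved, stated in full; the proofs are below) =====
def Claim_equal_compute : Prop := ∀ (data : List (List Int)), Dom_compute data → Pre_compute data → Spec_compute data (compute data)

-- ===== LEMMAS AND PROOFS =====

-- column sum of the grid
def Ssum (data : List (List Int)) (j : Nat) : Int := (data.map (fun r => r.getD j 0)).sum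

-- Horner value of the majority bits of columns 0..n-1
def gspec (data : List (List Int)) : Nat → Int
  | 0 => 0
  | n + 1 => 2 * gspec data n +
      (if 2 * Ssum data n > (data.length : Int) then 1 else 0)

theorem range_map_getD {α β : Type} (l : List α) (d : α) (f : α → β) :
    (List.range l.length).map (fun i => f (l.getD i d)) = l.map f := by
  apply List.ext_getElem
  · simp
  · intro i h1 h2
    simp at h2 ⊢
    simp [h2]

theorem A_fold_inv (data : List (List Int)) (cols : Nat) (n : Nat) (hn : n ≤ cols) :
    (List.range n).foldl
      (fun (p : Int × Int) j =>
        if 2 * Ssum data j > (data.length : Int)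
        then (p.1 + 2 ^ (cols - j - 1), p.2) else (p.1, p.2 + 2 ^ (cols - j - 1)))
      (0, 0)
    = (gspec data n * 2 ^ (cols - n),
       ((2 : Int) ^ cols - 2 ^ (cols - n)) - gspec data n * 2 ^ (cols - n)) := by
  induction n with
  | zero => simp [gspec]
  | succ m ih =>
    rw [List.range_succ, List.foldl_append, ih (by omega)]
    have h1 : cols - m = (cols - (m + 1)) + 1 := by omega
    have h2 : cols - m - 1 = cols - (m + 1) := by omega
    simp only [List.foldl_cons, List.foldl_nil, gspec, h2]
    simp only [h1, pow_succ]
    split <;> simp only [Prod.mk.injEq] <;> constructor <;> ring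

theorem headD_eq_getD (r : List Int) : r.headD 0 = r.getD 0 0 := by
  cases r <;> rfl

theorem tail_getD (r : List Int) (j : Nat) : r.tail.getD j 0 = r.getD (j + 1) 0 := by
  cases r <;> simp [List.getD]

theorem ptAux_eq (n : Nat) (rows : List (List Int))
    (h : ∀ r ∈ rows, n ≤ r.length) :
    ptAux n rows = (List.range n).map (fun j => rows.map (fun r => r.getD j 0)) := by
  induction n generalizing rows with
  | zero => simp [ptAux]
  | succ m ih =>
    have hne : ¬ rows.any List.isEmpty = true := by
      simp only [List.any_eq_true, not_exists]
      rintro r ⟨hm, hE⟩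
      have := h r hm
      cases r
      · simp at this
      · simp at hE
    rw [ptAux, if_neg hne, List.range_succ_eq_map, List.map_cons, List.map_map,
      ih (rows.map List.tail) (by
        intro r hr
        simp only [List.mem_map] at hr
        obtain ⟨r0, hr0, rfl⟩ := hr
        have := h r0 hr0
        cases r0 <;> simp_all)]
    congr 1
    · exact List.map_congr_left (fun r _ => headD_eq_getD r)
    · apply List.map_congr_left
      intro j _
      simp only [Function.comp, List.map_map]
      exact List.map_congr_left (fun r _ => tail_getD r j)

theorem parseBin_append_one (l : List Char) (c : Char) :
    parseBin (l ++ [c]) = 2 * parseBin l + (if c = '1' then 1 else 0) := by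
  simp [parseBin]

theorem parse_g (data : List (List Int)) (n : Nat) :
    parseBin ((List.range n).map
      (fun j => if 2 * Ssum data j > (data.length : Int) then '1' else '0'))
    = gspec data n := by
  induction n with
  | zero => simp [parseBin, gspec]
  | succ m ih =>
    rw [List.range_succ, List.map_append, List.map_singleton, parseBin_append_one, ih, gspec]
    split <;> simp

theorem parse_e (data : List (List Int)) (n : Nat) :
    parseBin (((List.range n).map
      (fun j => if 2 * Ssum data j > (data.length : Int) then '1' else '0')).map
        (fun b => if b = '1' then '0' else '1'))
    = 2 ^ n - 1 - gspec data n := by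
  induction n with
  | zero => simp [parseBin, gspec]
  | succ m ih =>
    rw [List.range_succ, List.map_append, List.map_singleton, List.map_append,
      List.map_singleton, parseBin_append_one, ih, gspec, pow_succ]
    split <;> simp <;> ring

theorem if_ne_nil_parseBin (l : List Char) :
    (if l ≠ [] then parseBin l else 0) = parseBin l := by
  by_cases h : l = [] <;> simp [h, parseBin]

-- ===== VERDICT (by name: the statement is the Claim_ definition above) =====
theorem compute_spec : Claim_equal_compute := by
  intro data _ hpre
  obtain ⟨hne, hrows⟩ := hpre
  unfold Spec_compute compute compute_alt
  simp only []
  set cols := (data.getD 0 []).length with hcols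
  -- A side
  have hA : ∀ (p : Int × Int) (j : Nat),
      (fun (p : Int × Int) j =>
        let ones : Int := ((List.range data.length).map (fun i => (data.getD i []).getD j 0)).sum
        let value : Int := 2 ^ (cols - j - 1)
        if 2 * ones > (data.length : Int) then (p.1 + value, p.2) else (p.1, p.2 + value)) p j
      = (fun (p : Int × Int) j =>
        if 2 * Ssum data j > (data.length : Int)
        then (p.1 + 2 ^ (cols - j - 1), p.2) else (p.1, p.2 + 2 ^ (cols - j - 1))) p j := by
    intro p j
    have := range_map_getD data [] (fun r => r.getD j 0)
    simp only [this, Ssum]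
    rfl
  rw [funext fun p => funext fun j => hA p j, A_fold_inv data cols cols le_rfl]
  -- B side: transpose is the list of the first `cols` columns
  have htr : pyTranspose data
      = (List.range cols).map (fun j => data.map (fun r => r.getD j 0)) := by
    obtain ⟨r, rs, rfl⟩ := List.exists_cons_of_ne_nil hne
    exact ptAux_eq r.length (r :: rs) hrows
  rw [htr, List.map_map]
  have hbits : (List.range cols).map
      ((fun col => if 2 * col.sum > ((data.length : Nat) : Int) then '1' else '0') ∘
        fun j => data.map fun r => r.getD j 0)
      = (List.range cols).map
        (fun j => if 2 * Ssum data j > (data.length : Int) then '1' else '0') := by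
    apply List.map_congr_left
    intro j _
    simp [Function.comp, Ssum]
  rw [hbits, if_ne_nil_parseBin, if_ne_nil_parseBin, parse_g, parse_e]
  simp only [Nat.sub_self, pow_zero, mul_one]
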